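-- pv_equiv track=rewrite | github.com/13sachin/aqtivate_tn_hackathon | jpeg_decode.py | split_after_every_second_occurrence
-- ===== SOURCE A (Python) =====
-- def split_after_every_second_occurrence(s, char):
--     result = []
--     count = 0
--     start = 0
--
--     for i, c in enumerate(s):
--         if c == char:
--             count += 1
--             if count == 2:
--                 result.append(s[start:i+1])
--                 start = i + 1
--                 count = 0
--
--     # Add the remaining part of the string
--     if start < len(s):
--         result.append(s[start:])
--
--     return result
-- ===== SOURCE B (Python) =====
-- def _odds(xs):
--     # elements at indices 1, 3, 5, ... of xs
--     return [] if len(xs) < 2 else [xs[1]] + _odds(xs[2:])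
--
-- def _emit(s, prev, bounds):
--     if not bounds:
--         return [s[prev:]] if prev < len(s) else []
--     b = bounds[0]
--     return [s[prev:b]] + _emit(s, b, bounds[1:])
--
-- def split_after_every_second_occurrence(s, char):
--     positions = [i for i, c in enumerate(s) if c == char]
--     bounds = [p + 1 for p in _odds(positions)]
--     return _emit(s, 0, bounds)
-- ===== Notes on version B (the rewrite author's own statement) =====
-- stated objective: alternative
-- what changed: B separates A's interleaved count-and-cut loop into two phases: it first collects all occurrence indices, takes every second one as a cut boundary, then slices the string between consecutive boundaries.
import Mathlib
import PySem

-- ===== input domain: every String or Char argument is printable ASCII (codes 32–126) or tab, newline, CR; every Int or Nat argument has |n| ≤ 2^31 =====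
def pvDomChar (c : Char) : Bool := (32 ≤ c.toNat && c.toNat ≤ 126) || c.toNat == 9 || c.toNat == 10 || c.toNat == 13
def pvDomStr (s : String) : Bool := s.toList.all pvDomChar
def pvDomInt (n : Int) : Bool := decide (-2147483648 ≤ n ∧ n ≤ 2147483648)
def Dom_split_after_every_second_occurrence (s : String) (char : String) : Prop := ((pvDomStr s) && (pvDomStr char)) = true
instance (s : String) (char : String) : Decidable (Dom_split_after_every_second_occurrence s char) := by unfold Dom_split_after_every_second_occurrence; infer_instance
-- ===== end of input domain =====

-- ===== PORT A =====
-- B changes the decomposition (two-phase: gather occurrence indices, then slice) -- alternative, same cost.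
def saeso_loop (s : String) (char : String) : List (Int × Char) → List String × Nat × Int → List String × Nat × Int
  | [], st => st
  | (i, c) :: rest, (result, count, start) =>
    if String.singleton c = char then
      if count + 1 = 2 then
        saeso_loop s char rest
          (result ++ [String.mk (PySem.List.slice s.toList (some start) (some (i + 1)))], 0, i + 1)
      else
        saeso_loop s char rest (result, count + 1, start)
    else
      saeso_loop s char rest (result, count, start)

def split_after_every_second_occurrence (s : String) (char : String) : List String :=
  let st := saeso_loop s char (PySem.List.enumerate s.toList 0) ([], 0, 0)
  if st.2.2 < (s.toList.length : Int) then
    st.1 ++ [String.mk (PySem.List.slice s.toList (some st.2.2) none)]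
  else
    st.1

-- ===== PORT B =====
def saesoAlt_odds : List Int → List Int
  | [] => []
  | [_] => []
  | _ :: b :: t => b :: saesoAlt_odds t

def saesoAlt_emit (s : String) : Int → List Int → List String
  | prev, [] =>
    if prev < (s.toList.length : Int) then
      [String.mk (PySem.List.slice s.toList (some prev) none)]
    else []
  | prev, b :: bs =>
    String.mk (PySem.List.slice s.toList (some prev) (some b)) :: saesoAlt_emit s b bs

def split_after_every_second_occurrence_alt (s : String) (char : String) : List String :=
  let positions := (PySem.List.enumerate s.toList 0).filterMap
    (fun p => if String.singleton p.2 = char then some p.1 else none)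
  let bounds := (saesoAlt_odds positions).map (· + 1)
  saesoAlt_emit s 0 bounds

-- ===== PRECONDITION & SPEC =====
def Spec_split_after_every_second_occurrence (s : String) (char : String) (out : List String) : Prop := out = split_after_every_second_occurrence_alt s char
instance (s : String) (char : String) (out : List String) : Decidable (Spec_split_after_every_second_occurrence s char out) := by unfold Spec_split_after_every_second_occurrence; infer_instance

-- ===== CLAIM (what is proved, stated in full; the proofs are below) =====
def Claim_equal_split_after_every_second_occurrence : Prop := ∀ (s : String) (char : String), Dom_split_after_every_second_occurrence s char → Spec_split_after_every_second_occurrence s char (split_after_every_second_occurrence s char)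

-- ===== LEMMAS AND PROOFS =====
def saeso_positions (char : String) (l : List Char) (k : Int) : List Int :=
  (PySem.List.enumerate l k).filterMap (fun p => if String.singleton p.2 = char then some p.1 else none)

-- every-second starting at index 0 (the count = 1 state of A's loop)
def saesoAlt_odds1 : List Int → List Int
  | [] => []
  | b :: t => b :: saesoAlt_odds t

def saeso_finalize (s : String) (st : List String × Nat × Int) : List String :=
  if st.2.2 < (s.toList.length : Int) then
    st.1 ++ [String.mk (PySem.List.slice s.toList (some st.2.2) none)]
  else
    st.1

lemma saesoAlt_odds_cons (a : Int) (P : List Int) :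
    saesoAlt_odds (a :: P) = saesoAlt_odds1 P := by
  cases P <;> simp [saesoAlt_odds, saesoAlt_odds1]

lemma saeso_main (s char : String) :
    ∀ (l : List Char) (k : Int) (res : List String) (start : Int),
      (saeso_finalize s (saeso_loop s char (PySem.List.enumerate l k) (res, 0, start))
        = res ++ saesoAlt_emit s start ((saesoAlt_odds (saeso_positions char l k)).map (· + 1)))
      ∧ (saeso_finalize s (saeso_loop s char (PySem.List.enumerate l k) (res, 1, start))
        = res ++ saesoAlt_emit s start ((saesoAlt_odds1 (saeso_positions char l k)).map (· + 1))) := by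
  intro l
  induction l with
  | nil =>
    intro k res start
    constructor <;>
    · simp only [PySem.List.enumerate_nil, saeso_loop, saeso_positions, List.filterMap_nil,
        saesoAlt_odds, saesoAlt_odds1, List.map_nil, saesoAlt_emit, saeso_finalize]
      split_ifs <;> simp
  | cons c t ih =>
    intro k res start
    by_cases h : String.singleton c = char
    · constructor
      · simp only [PySem.List.enumerate_cons, saeso_loop, h, if_true, saeso_positions,
          List.filterMap_cons, saesoAlt_odds_cons]
        simpa [saeso_positions] using (ih (k + 1) res start).2
      · simp only [PySem.List.enumerate_cons, saeso_loop, h, if_true, saeso_positions,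
          List.filterMap_cons, saesoAlt_odds1, List.map_cons, saesoAlt_emit]
        rw [(ih (k + 1) (res ++ [String.mk (PySem.List.slice s.toList (some start) (some (k + 1)))]) (k + 1)).1]
        simp [saeso_positions]
    · constructor <;>
      · simp only [PySem.List.enumerate_cons, saeso_loop, h, if_false, saeso_positions,
          List.filterMap_cons]
        first
        | simpa [saeso_positions] using (ih (k + 1) res start).1
        | simpa [saeso_positions] using (ih (k + 1) res start).2

-- ===== VERDICT (by name: the statement is the Claim_ definition above) =====
theorem split_after_every_second_occurrence_spec : Claim_equal_split_after_every_second_occurrence := by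
  intro s char _
  unfold Spec_split_after_every_second_occurrence
  show saeso_finalize s (saeso_loop s char (PySem.List.enumerate s.toList 0) ([], 0, 0)) = _
  rw [(saeso_main s char s.toList 0 [] 0).1]
  rfl
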